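-- pv_equiv track=rewrite | github.com/tsuru7/algorithm-study | typical90/07/A.py | solve
-- ===== SOURCE A (Python) =====
-- from bisect import bisect_left, bisect_right
--
-- def solve(n,a,q,b):
--     a.sort()
--     ans=[]
--     for i in range(q):
--         bi = b[i]
--         idx = bisect_left(a, bi)
--         if idx == 0:
--             ans.append(a[0]-bi)
--         elif idx == n:
--             ans.append(bi-a[n-1])
--         else:
--             ans.append(min(a[idx]-bi, bi-a[idx-1]))
--     return ans
-- ===== SOURCE B (Python) =====
-- def solve(n, a, q, b):
--     a.sort()
--     order = sorted(range(q), key=lambda i: b[i])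
--     res = [0] * q
--     j = 0
--     for i in order:
--         bi = b[i]
--         while j < len(a) and a[j] < bi:
--             j += 1
--         if j == 0:
--             res[i] = a[0] - bi
--         elif j == n:
--             res[i] = bi - a[n - 1]
--         else:
--             res[i] = min(a[j] - bi, bi - a[j - 1])
--     return res
-- ===== Notes on version B (the rewrite author's own statement) =====
-- stated objective: alternative
-- what changed: Replaces the per-query binary search by an offline sweep: query indices are sorted by query value, a single pointer advances once across the sorted array to find each bisection point, and results are written back at their original positions.
import Mathlib
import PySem

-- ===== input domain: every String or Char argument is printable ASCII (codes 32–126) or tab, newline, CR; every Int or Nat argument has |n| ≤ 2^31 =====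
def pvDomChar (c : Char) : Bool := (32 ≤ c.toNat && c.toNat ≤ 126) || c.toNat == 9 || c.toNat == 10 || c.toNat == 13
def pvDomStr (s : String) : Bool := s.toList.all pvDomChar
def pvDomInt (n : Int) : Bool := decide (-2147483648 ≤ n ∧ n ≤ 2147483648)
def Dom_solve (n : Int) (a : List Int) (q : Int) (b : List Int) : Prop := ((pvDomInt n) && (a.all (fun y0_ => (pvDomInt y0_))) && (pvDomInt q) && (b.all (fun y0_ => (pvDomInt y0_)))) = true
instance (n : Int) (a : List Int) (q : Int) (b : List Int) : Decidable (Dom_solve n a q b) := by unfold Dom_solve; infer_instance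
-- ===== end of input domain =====

-- B replaces A's per-query binary search by an offline sweep: it sorts the query indices by
-- value and advances a single pointer over the sorted array, filling results back at their
-- original positions (objective: alternative, same cost); like A, B sorts the list argument
-- `a` in place — the equivalence proved is about the return value.


-- ===== PORT A =====
def solve (n : Int) (a : List Int) (q : Int) (b : List Int) : List Int :=
  let aS := PySem.List.sorted a (fun x => x)        -- a.sort()
  (PySem.List.pyRange 0 q 1).foldl (fun ans i =>
    let bi := PySem.List.pyGetD b i 0               -- b[i]   (in range under Pre_)
    let idx := PySem.List.bisectLeft aS bi          -- bisect_left(a, bi)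
    if (idx : Int) = 0 then ans ++ [PySem.List.pyGetD aS 0 0 - bi]
    else if (idx : Int) = n then ans ++ [bi - PySem.List.pyGetD aS (n - 1) 0]
    else ans ++ [min (PySem.List.pyGetD aS (idx : Int) 0 - bi)
                     (bi - PySem.List.pyGetD aS ((idx : Int) - 1) 0)]) []

-- ===== PORT B =====
-- B-side helper: the 'while j < len(a) and a[j] < bi: j += 1' loop
def advanceWhile (s : List Int) (x : Int) (j : Nat) : Nat :=
  if h : j < s.length then
    (if s[j] < x then advanceWhile s x (j + 1) else j)
  else j
termination_by s.length - j
decreasing_by omega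

def solve_alt (n : Int) (a : List Int) (q : Int) (b : List Int) : List Int :=
  let aS := PySem.List.sorted a (fun x => x)                                     -- a.sort()
  let order := PySem.List.sorted (PySem.List.pyRange 0 q 1)
                 (fun i => PySem.List.pyGetD b i 0)                              -- sorted(range(q), key=lambda i: b[i])
  (order.foldl (fun (st : List Int × Nat) i =>
      let bi := PySem.List.pyGetD b i 0
      let j := advanceWhile aS bi st.2
      (if (j : Int) = 0 then st.1.set i.toNat (PySem.List.pyGetD aS 0 0 - bi)
       else if (j : Int) = n then st.1.set i.toNat (bi - PySem.List.pyGetD aS (n - 1) 0)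
       else st.1.set i.toNat (min (PySem.List.pyGetD aS (j : Int) 0 - bi)
                                  (bi - PySem.List.pyGetD aS ((j : Int) - 1) 0)), j))
    (List.replicate q.toNat 0, 0)).1                                             -- res = [0]*q

-- ===== PRECONDITION & SPEC =====
-- Pre_ is exactly A's returning domain (B raises on exactly the same inputs): b holds the q
-- queried entries (else b[i] raises IndexError), a is nonempty when a query is made (else
-- a[0] raises IndexError), and when the bound n is not len(a), no query may lie strictly
-- above every element of a — A's bisection index then equals len(a), misses the `== n` guard
-- and a[idx] raises IndexError.  The bisection index of x is the number of elements of a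
-- smaller than x, i.e. a's countP (· < x).
def Pre_solve (n : Int) (a : List Int) (q : Int) (b : List Int) : Prop :=
  q ≤ (b.length : Int) ∧ (a ≠ [] ∨ q ≤ 0) ∧
  (n = (a.length : Int) ∨
    ∀ x ∈ b.take q.toNat, a.countP (fun y => decide (y < x)) ≠ a.length)
instance (n : Int) (a : List Int) (q : Int) (b : List Int) : Decidable (Pre_solve n a q b) := by
  unfold Pre_solve; infer_instance
def pvWitness_solve : Int × List Int × Int × List Int := (3, [1, 5, 9], 2, [2, 8])

def Spec_solve (n : Int) (a : List Int) (q : Int) (b : List Int) (out : List Int) : Prop :=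
  out = solve_alt n a q b
instance (n : Int) (a : List Int) (q : Int) (b : List Int) (out : List Int) :
    Decidable (Spec_solve n a q b out) := by unfold Spec_solve; infer_instance

-- ===== CLAIM (what is proved, stated in full; the proofs are below) =====
def Claim_equal_solve : Prop := ∀ (n : Int) (a : List Int) (q : Int) (b : List Int),
  Dom_solve n a q b → Pre_solve n a q b → Spec_solve n a q b (solve n a q b)

-- ===== LEMMAS AND PROOFS =====

-- the value both programs produce for query index i (proof-only abbreviation)
def caseVal (s : List Int) (n : Int) (b : List Int) (i : Int) : Int :=
  let bi := PySem.List.pyGetD b i 0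
  let idx := PySem.List.bisectLeft s bi
  if (idx : Int) = 0 then PySem.List.pyGetD s 0 0 - bi
  else if (idx : Int) = n then bi - PySem.List.pyGetD s (n - 1) 0
  else min (PySem.List.pyGetD s (idx : Int) 0 - bi)
           (bi - PySem.List.pyGetD s ((idx : Int) - 1) 0)

-- range(q) is empty for q ≤ 0
theorem pyRange_one_nil (q : Int) (h : q ≤ 0) : PySem.List.pyRange 0 q 1 = [] := by
  unfold PySem.List.pyRange
  norm_num
  intro h2
  omega

-- countP (· < x) counts exactly the prefix below a cut index
theorem countP_eq_of_prefix (s : List Int) (x : Int) (idx : Nat) (hle : idx ≤ s.length)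
    (h : ∀ (j : Nat) (hj : j < s.length), s[j] < x ↔ j < idx) :
    s.countP (fun y => decide (y < x)) = idx := by
  induction s generalizing idx with
  | nil => simp at hle ⊢; omega
  | cons c t ih =>
    by_cases hc : c < x
    · have h0 : 0 < idx := (h 0 (by simp)).mp (by simpa using hc)
      rw [List.countP_cons_of_pos (by simpa using hc)]
      have := ih (idx - 1) (by simp at hle; omega) (by
        intro j hj
        have := h (j + 1) (by simpa using Nat.succ_lt_succ hj)
        simpa [Nat.lt_sub_iff_add_lt, Nat.add_comm] using this)
      omega
    · have h0 : idx = 0 := by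
        by_contra hx
        exact hc (by simpa using (h 0 (by simp)).mpr (by omega))
      subst h0
      rw [List.countP_cons_of_neg (by simpa using hc)]
      exact ih 0 (by omega) (by
        intro j hj
        have := h (j + 1) (by simpa using Nat.succ_lt_succ hj)
        simpa using this)

-- the bisection index is the number of elements of a below the query
theorem bisect_eq_countP (a : List Int) (x : Int) :
    PySem.List.bisectLeft (PySem.List.sorted a (fun y => y)) x
      = a.countP (fun y => decide (y < x)) := by
  set s := PySem.List.sorted a (fun y => y) with hs
  have hp : List.Pairwise (· ≤ ·) s := PySem.List.sorted_pairwise a _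
  obtain ⟨hle, hlt, hge⟩ := PySem.List.bisectLeft_spec s x hp
  have hcs : s.countP (fun y => decide (y < x)) = PySem.List.bisectLeft s x :=
    countP_eq_of_prefix s x _ hle (by
      intro j hj
      constructor
      · intro hlt2
        by_contra hc
        exact absurd hlt2 (not_lt.mpr (hge j hj (by omega)))
      · intro hc
        exact hlt j hj hc)
  rw [← hcs]
  exact (List.Perm.countP_eq _ (PySem.List.sorted_perm a _ _))

-- the bisection index is monotone in the query
theorem bisect_mono (a : List Int) (x x' : Int) (h : x ≤ x') :
    PySem.List.bisectLeft (PySem.List.sorted a (fun y => y)) x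
      ≤ PySem.List.bisectLeft (PySem.List.sorted a (fun y => y)) x' := by
  rw [bisect_eq_countP, bisect_eq_countP]
  apply List.countP_mono_left
  intro y _ hy
  simp at hy ⊢
  omega

-- the pointer advance from any position at or below the bisection index lands on it
theorem advance_eq (s : List Int) (hp : List.Pairwise (· ≤ ·) s) (x : Int) :
    ∀ (k j0 : Nat), s.length - j0 ≤ k → j0 ≤ PySem.List.bisectLeft s x →
      advanceWhile s x j0 = PySem.List.bisectLeft s x := by
  obtain ⟨hle, hlt, hge⟩ := PySem.List.bisectLeft_spec s x hp
  intro k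
  induction k with
  | zero =>
    intro j0 hk hj
    rw [advanceWhile]
    rw [dif_neg (by omega)]
    omega
  | succ k ih =>
    intro j0 hk hj
    rw [advanceWhile]
    rcases Nat.lt_or_ge j0 s.length with hl | hl
    · rw [dif_pos hl]
      by_cases h : s[j0] < x
      · rw [if_pos h]
        have hlt0 : j0 < PySem.List.bisectLeft s x := by
          by_contra hc
          exact absurd h (not_lt.mpr (hge j0 hl (by omega)))
        exact ih (j0 + 1) (by omega) (by omega)
      · rw [if_neg h]
        have : PySem.List.bisectLeft s x ≤ j0 := by
          by_contra hc
          exact h (hlt j0 hl (by omega))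
        omega
    · rw [dif_neg (by omega)]
      omega

-- the sweep writes caseVal at every visited index, in any order with nondecreasing keys
theorem sweep (s : List Int) (n : Int) (b : List Int)
    (hmono : ∀ x x', x ≤ x' → PySem.List.bisectLeft s x ≤ PySem.List.bisectLeft s x')
    (hp : List.Pairwise (· ≤ ·) s) :
    ∀ (is : List Int) (res : List Int) (j0 : Nat),
      List.Pairwise (fun i i' => PySem.List.pyGetD b i 0 ≤ PySem.List.pyGetD b i' 0) is →
      (∀ i ∈ is, j0 ≤ PySem.List.bisectLeft s (PySem.List.pyGetD b i 0)) →
      (is.foldl (fun (st : List Int × Nat) i =>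
          (if (advanceWhile s (PySem.List.pyGetD b i 0) st.2 : Int) = 0 then
             st.1.set i.toNat (PySem.List.pyGetD s 0 0 - PySem.List.pyGetD b i 0)
           else if (advanceWhile s (PySem.List.pyGetD b i 0) st.2 : Int) = n then
             st.1.set i.toNat (PySem.List.pyGetD b i 0 - PySem.List.pyGetD s (n - 1) 0)
           else st.1.set i.toNat
             (min (PySem.List.pyGetD s (advanceWhile s (PySem.List.pyGetD b i 0) st.2 : Int) 0
                     - PySem.List.pyGetD b i 0)
                  (PySem.List.pyGetD b i 0
                     - PySem.List.pyGetD s ((advanceWhile s (PySem.List.pyGetD b i 0) st.2 : Int) - 1) 0)),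
           advanceWhile s (PySem.List.pyGetD b i 0) st.2))
        (res, j0)).1
      = is.foldl (fun r i => r.set i.toNat (caseVal s n b i)) res := by
  intro is
  induction is with
  | nil => intro res j0 _ _; rfl
  | cons i t ih =>
    intro res j0 hord hj
    have hadv : advanceWhile s (PySem.List.pyGetD b i 0) j0
        = PySem.List.bisectLeft s (PySem.List.pyGetD b i 0) :=
      advance_eq s hp _ s.length j0 (by omega) (hj i (by simp))
    simp only [List.foldl_cons]
    have hstep : ((if (advanceWhile s (PySem.List.pyGetD b i 0) j0 : Int) = 0 then
            res.set i.toNat (PySem.List.pyGetD s 0 0 - PySem.List.pyGetD b i 0)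
          else if (advanceWhile s (PySem.List.pyGetD b i 0) j0 : Int) = n then
            res.set i.toNat (PySem.List.pyGetD b i 0 - PySem.List.pyGetD s (n - 1) 0)
          else res.set i.toNat
            (min (PySem.List.pyGetD s (advanceWhile s (PySem.List.pyGetD b i 0) j0 : Int) 0
                    - PySem.List.pyGetD b i 0)
                 (PySem.List.pyGetD b i 0
                    - PySem.List.pyGetD s ((advanceWhile s (PySem.List.pyGetD b i 0) j0 : Int) - 1) 0))),
          advanceWhile s (PySem.List.pyGetD b i 0) j0)
        = (res.set i.toNat (caseVal s n b i),
           PySem.List.bisectLeft s (PySem.List.pyGetD b i 0)) := by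
      rw [hadv]
      unfold caseVal
      dsimp only
      split_ifs <;> rfl
    rw [hstep]
    apply ih
    · exact hord.of_cons
    · intro i' hi'
      exact le_trans (hmono _ _ ((List.pairwise_cons.mp hord).1 i' hi')) (le_refl _)

-- scattering: a fold of position-determined writes, read back elementwise
theorem length_foldl_set (is : List Int) (G : Int → Int) (res : List Int) :
    (is.foldl (fun r i => r.set i.toNat (G i)) res).length = res.length := by
  induction is generalizing res with
  | nil => rfl
  | cons i t ih => simp [List.foldl_cons, ih]

theorem getElem_foldl_set (is : List Int) (G : Int → Int) (res : List Int)
    (hpos : ∀ i ∈ is, 0 ≤ i) (k : Nat) (hk : k < res.length) :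
    (is.foldl (fun r i => r.set i.toNat (G i)) res)[k]'(by rw [length_foldl_set]; exact hk)
      = if (k : Int) ∈ is then G (k : Int) else res[k] := by
  induction is generalizing res with
  | nil => simp
  | cons i t ih =>
    simp only [List.foldl_cons]
    rw [ih (res.set i.toNat (G i)) (fun i' hi' => hpos i' (by simp [hi']))
        (by simpa using hk)]
    by_cases hkt : (k : Int) ∈ t
    · simp [hkt]
    · by_cases hki : (k : Int) = i
      · subst hki
        rw [if_neg hkt, if_pos (List.mem_cons_self)]
        rw [List.getElem_set (by simpa using hk)]
        simp
      · have hne : i.toNat ≠ k := by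
          intro hc
          have hpi : 0 ≤ i := hpos i (by simp)
          omega
        rw [if_neg hkt, if_neg (by simp [hkt, hki])]
        rw [List.getElem_set (by simpa using hk), if_neg hne]

theorem solve_eq_alt (n : Int) (a : List Int) (q : Int) (b : List Int) :
    solve n a q b = solve_alt n a q b := by
  unfold solve solve_alt
  set s := PySem.List.sorted a (fun x => x) with hs
  dsimp only
  set order := PySem.List.sorted (PySem.List.pyRange 0 q 1)
      (fun i => PySem.List.pyGetD b i 0) with horder
  have hperm : order.Perm (PySem.List.pyRange 0 q 1) := PySem.List.sorted_perm _ _ _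
  have hord : List.Pairwise
      (fun i i' => PySem.List.pyGetD b i 0 ≤ PySem.List.pyGetD b i' 0) order :=
    PySem.List.sorted_pairwise _ _
  have hpos : ∀ i ∈ order, 0 ≤ i := by
    intro i hi
    have : i ∈ PySem.List.pyRange 0 q 1 := hperm.mem_iff.mp hi
    exact ((PySem.List.mem_pyRange_one).mp this).1
  have hp : List.Pairwise (· ≤ ·) s := PySem.List.sorted_pairwise a _
  -- A's loop appends one value per i; pull the if inside the appended singleton
  rw [show (fun (ans : List Int) (i : Int) =>
      if (PySem.List.bisectLeft s (PySem.List.pyGetD b i 0) : Int) = 0 then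
        ans ++ [PySem.List.pyGetD s 0 0 - PySem.List.pyGetD b i 0]
      else if (PySem.List.bisectLeft s (PySem.List.pyGetD b i 0) : Int) = n then
        ans ++ [PySem.List.pyGetD b i 0 - PySem.List.pyGetD s (n - 1) 0]
      else ans ++ [min (PySem.List.pyGetD s (PySem.List.bisectLeft s (PySem.List.pyGetD b i 0) : Int) 0 - PySem.List.pyGetD b i 0)
                       (PySem.List.pyGetD b i 0 - PySem.List.pyGetD s ((PySem.List.bisectLeft s (PySem.List.pyGetD b i 0) : Int) - 1) 0)]) =
    (fun ans i => ans ++ [caseVal s n b i]) from by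
    funext ans i
    unfold caseVal
    dsimp only
    split_ifs <;> rfl]
  rw [PySem.List.foldl_append_singleton_eq_map]
  simp only [List.nil_append]
  -- B's sweep writes caseVal at every index of order
  have hmono : ∀ x x', x ≤ x' →
      PySem.List.bisectLeft s x ≤ PySem.List.bisectLeft s x' := by
    intro x x' hx
    rw [hs]
    exact bisect_mono a x x' hx
  rw [sweep s n b hmono hp order (List.replicate q.toNat 0) 0 hord (fun _ _ => Nat.zero_le _)]
  -- compare elementwise
  apply List.ext_getElem
  · rw [length_foldl_set]
    simp only [List.length_map, List.length_replicate]
    by_cases hq : 0 < q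
    · have hqn : q = ((q.toNat : Nat) : Int) := by omega
      rw [hqn, PySem.List.pyRange_zero_natCast]
      simp
      omega
    · rw [pyRange_one_nil q (by omega)]
      simp
      omega
  · intro t h1 h2
    have hq : 0 < q := by
      by_contra hc
      rw [pyRange_one_nil q (by omega)] at h1
      simp at h1
    have hqn : q = ((q.toNat : Nat) : Int) := by omega
    have hlp : (PySem.List.pyRange 0 q 1).length = q.toNat := by
      rw [hqn, PySem.List.pyRange_zero_natCast]
      simp
      omega
    have ht : t < q.toNat := by
      simpa [hlp] using h1
    rw [List.getElem_map]
    rw [PySem.List.getElem_pyRange_one 0 _ t (by rw [hlp]; exact ht)]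
    simp only [zero_add]
    rw [getElem_foldl_set order _ _ hpos t (by simpa using ht)]
    have hmem : (t : Int) ∈ order := by
      apply hperm.mem_iff.mpr
      rw [PySem.List.mem_pyRange_one]
      constructor
      · omega
      · omega
    rw [if_pos hmem]

-- ===== VERDICT (by name: the statement is the Claim_ definition above) =====
theorem solve_spec : Claim_equal_solve := by
  intro n a q b _hdom _hpre
  exact solve_eq_alt n a q b
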